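-- pv_equiv track=rewrite | github.com/land-boards/lb-Python-Code | AoC/AoC-2019/Day07/Pt2-AoC-Day7.py | genTestVecs
-- ===== SOURCE A (Python) =====
-- def genTestVecs(startPh, endPh):
-- 	vecsList = []
-- 	for dig0 in range(startPh,endPh+1):
-- 		for dig1 in range(startPh,endPh+1):
-- 			if dig1!= dig0:
-- 				for dig2 in range(startPh,endPh+1):
-- 					if ((dig2 != dig1) and (dig2 != dig0)):
-- 						for dig3 in range(startPh,endPh+1):
-- 							if ((dig3 != dig2) and (dig3 != dig1) and (dig3 != dig0)):
-- 								for dig4 in range(startPh,endPh+1):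
-- 									if ((dig4 != dig3) and (dig4 != dig2) and (dig4 != dig1) and (dig4 != dig0)):
-- 										vecsList.append([dig0,dig1,dig2,dig3,dig4])
-- 	return(vecsList)
-- ===== SOURCE B (Python) =====
-- def genTestVecs(startPh, endPh):
--     # Recursive backtracking over a partial permutation instead of five nested loops.
--     vecsList = []
--
--     def backtrack(partial):
--         if len(partial) == 5:
--             vecsList.append(partial[:])
--             return
--         for d in range(startPh, endPh + 1):
--             if d not in partial:
--                 backtrack(partial + [d])
--
--     backtrack([])
--     return vecsList
-- ===== Notes on version B (the rewrite author's own statement) =====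
-- stated objective: simpler
-- what changed: Replaces the five hard-coded nested loops with a single recursive backtracking helper over a partial permutation, scanning candidates in ascending order.
import Mathlib
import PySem

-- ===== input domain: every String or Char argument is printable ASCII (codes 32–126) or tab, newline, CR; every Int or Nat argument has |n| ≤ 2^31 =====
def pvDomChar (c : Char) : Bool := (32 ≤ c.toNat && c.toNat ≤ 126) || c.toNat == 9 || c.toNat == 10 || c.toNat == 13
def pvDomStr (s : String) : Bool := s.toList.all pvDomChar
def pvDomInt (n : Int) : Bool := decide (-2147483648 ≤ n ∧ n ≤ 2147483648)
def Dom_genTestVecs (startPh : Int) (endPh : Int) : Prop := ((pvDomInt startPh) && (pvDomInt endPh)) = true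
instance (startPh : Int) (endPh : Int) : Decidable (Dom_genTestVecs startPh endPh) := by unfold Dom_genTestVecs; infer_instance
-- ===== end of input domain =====

-- B replaces the five hard-coded nested loops with one recursive backtracking helper; equal output, same cost.

-- ===== PORT A =====
-- Five nested loops over range(startPh, endPh+1), appending [d0,d1,d2,d3,d4] when all digits are distinct.
def genTestVecs (startPh : Int) (endPh : Int) : List (List Int) :=
  let rng := PySem.List.pyRange startPh (endPh + 1) 1
  rng.foldl (fun acc0 d0 =>
    rng.foldl (fun acc1 d1 =>
      if d1 ≠ d0 then
        rng.foldl (fun acc2 d2 =>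
          if d2 ≠ d1 ∧ d2 ≠ d0 then
            rng.foldl (fun acc3 d3 =>
              if d3 ≠ d2 ∧ d3 ≠ d1 ∧ d3 ≠ d0 then
                rng.foldl (fun acc4 d4 =>
                  if d4 ≠ d3 ∧ d4 ≠ d2 ∧ d4 ≠ d1 ∧ d4 ≠ d0 then
                    acc4 ++ [[d0, d1, d2, d3, d4]]
                  else acc4) acc3
              else acc3) acc2
          else acc2) acc1
      else acc1) acc0) []

-- ===== PORT B =====
-- backtrack(partial): at depth 5 emit a copy of the partial list, otherwise extend it with each
-- unused candidate of the range in ascending order.  Fuel = 5 - len(partial) (Python tests len(partial)==5).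
def btGo (rng : List Int) (part : List Int) : Nat → List (List Int)
  | 0 => [part]
  | k + 1 => rng.flatMap (fun d => if d ∈ part then [] else btGo rng (part ++ [d]) k)

def genTestVecs_alt (startPh : Int) (endPh : Int) : List (List Int) :=
  btGo (PySem.List.pyRange startPh (endPh + 1) 1) [] 5

-- ===== PRECONDITION & SPEC =====
def Spec_genTestVecs (startPh : Int) (endPh : Int) (out : List (List Int)) : Prop := out = genTestVecs_alt startPh endPh
instance (startPh : Int) (endPh : Int) (out : List (List Int)) : Decidable (Spec_genTestVecs startPh endPh out) := by unfold Spec_genTestVecs; infer_instance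

-- ===== CLAIM (what is proved, stated in full; the proofs are below) =====
def Claim_equal_genTestVecs : Prop := ∀ (startPh : Int) (endPh : Int), Dom_genTestVecs startPh endPh → Spec_genTestVecs startPh endPh (genTestVecs startPh endPh)

-- ===== LEMMAS AND PROOFS =====

-- 'if p: out += s' as an append of a conditional block
theorem ite_append_block {β : Type} {p : Prop} [Decidable p] (a s : List β) :
    (if p then a ++ s else a) = a ++ (if p then s else []) := by
  split <;> simp

theorem btGo_zero (rng part : List Int) : btGo rng part 0 = [part] := rfl

theorem btGo_succ (rng part : List Int) (k : Nat) :
    btGo rng part (k + 1) = rng.flatMap (fun d => if d ∈ part then [] else btGo rng (part ++ [d]) k) := rfl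

-- ===== VERDICT (by name: the statement is the Claim_ definition above) =====
theorem genTestVecs_spec : Claim_equal_genTestVecs := by
  intro s e _
  unfold Spec_genTestVecs genTestVecs genTestVecs_alt
  simp only [ite_append_block, PySem.List.foldl_append_eq_flatMap, List.nil_append,
    show (5 : Nat) = 4 + 1 from rfl, btGo_succ, btGo_zero, List.not_mem_nil, List.mem_cons,
    List.nil_append, List.cons_append]
  congr 1; funext d0
  rw [if_neg not_false]
  congr 1; funext d1
  by_cases h1 : d1 = d0 ∨ False
  · rw [if_neg (by tauto), if_pos h1]
  · rw [if_pos (by tauto), if_neg h1]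
    congr 1; funext d2
    by_cases h2 : d2 = d0 ∨ d2 = d1 ∨ False
    · rw [if_neg (by tauto), if_pos h2]
    · rw [if_pos (by tauto), if_neg h2]
      congr 1; funext d3
      by_cases h3 : d3 = d0 ∨ d3 = d1 ∨ d3 = d2 ∨ False
      · rw [if_neg (by tauto), if_pos h3]
      · rw [if_pos (by tauto), if_neg h3]
        congr 1; funext d4
        by_cases h4 : d4 = d0 ∨ d4 = d1 ∨ d4 = d2 ∨ d4 = d3 ∨ False
        · rw [if_neg (by tauto), if_pos h4]
        · rw [if_pos (by tauto), if_neg h4]
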